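-- pv_equiv track=rewrite | github.com/o0H-M0o/MindCare---Depression-Detection | frontend/pages/Journal.py | limit_records_by_word_count
-- ===== SOURCE A (Python) =====
-- def limit_records_by_word_count(records, text_key: str, max_words: int) -> list:
--     """Limit records to the most recent items whose combined word count stays within max_words."""
--     limited = []
--     total_words = 0
--     for record in records:
--         text = str(record.get(text_key, "")).strip()
--         if not text:
--             continue
--         words = len(text.split())
--         if total_words + words > max_words:
--             break
--         limited.append(record)
--         total_words += words
--     return limited
-- ===== SOURCE B (Python) =====
-- def limit_records_by_word_count(records, text_key: str, max_words: int) -> list: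
--     """Limit records to the most recent items whose combined word count stays within max_words."""
--     # Phase 1: filtered table of (record, word_count), dropping empty-text records.
--     table = []
--     for record in records:
--         text = str(record.get(text_key, "")).strip()
--         if text:
--             table.append((record, len(text.split())))
--     # Phase 2: running cumulative totals over the table.
--     cums = []
--     t = 0
--     for _, w in table:
--         t += w
--         cums.append(t)
--     # Phase 3: take the prefix whose cumulative total is still within max_words.
--     k = 0
--     while k < len(cums) and cums[k] <= max_words:
--         k += 1
--     return [record for record, _ in table[:k]]
-- ===== Notes on version B (the rewrite author's own statement) =====
-- stated objective: alternative
-- what changed: A is one fused loop with running total and break; B is a three-phase pipeline: build a filtered (record, word_count) table, form cumulative sums, then take the prefix whose cumulative sum stays within max_words.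
import Mathlib
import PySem

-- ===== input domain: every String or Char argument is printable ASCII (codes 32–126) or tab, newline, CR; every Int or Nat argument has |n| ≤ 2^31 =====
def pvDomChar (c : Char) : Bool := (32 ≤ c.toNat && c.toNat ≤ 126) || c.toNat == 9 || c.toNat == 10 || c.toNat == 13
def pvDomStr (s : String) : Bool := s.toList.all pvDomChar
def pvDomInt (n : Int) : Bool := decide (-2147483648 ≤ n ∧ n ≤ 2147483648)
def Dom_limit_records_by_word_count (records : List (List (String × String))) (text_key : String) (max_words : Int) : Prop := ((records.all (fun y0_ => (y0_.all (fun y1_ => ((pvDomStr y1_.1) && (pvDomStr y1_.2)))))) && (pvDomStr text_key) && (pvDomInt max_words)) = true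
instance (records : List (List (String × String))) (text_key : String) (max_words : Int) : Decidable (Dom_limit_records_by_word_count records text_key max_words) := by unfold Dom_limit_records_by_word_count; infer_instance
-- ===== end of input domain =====

-- B replaces A's fused accumulate-and-break loop by a three-phase pipeline (filtered word-count
-- table, cumulative sums, prefix within the limit); objective: alternative decomposition.

-- ===== PORT A =====
-- shared text/word-count helpers (text = str(record.get(text_key, "")).strip(); words = len(text.split()))
def pvText (tk : String) (r : List (String × String)) : String :=
  PySem.Str.strip (PySem.Dict.getD (PySem.Dict.mk r) tk "")

def pvWords (tk : String) (r : List (String × String)) : Int :=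
  ((PySem.Str.split₀ (pvText tk r)).length : Int)

-- A's loop: skip records with empty stripped text, break once the running total would exceed
-- max_words, otherwise append the record and add its word count.
def pvALoop (text_key : String) (max_words : Int) :
    List (List (String × String)) → Int → List (List (String × String))
  | [], _ => []
  | record :: rest, total_words =>
    if pvText text_key record = "" then pvALoop text_key max_words rest total_words
    else
      let words := pvWords text_key record
      if total_words + words > max_words then []
      else record :: pvALoop text_key max_words rest (total_words + words)

def limit_records_by_word_count (records : List (List (String × String))) (text_key : String) (max_words : Int) : List (List (String × String)) :=
  pvALoop text_key max_words records 0

-- ===== PORT B =====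
-- Phase 1: filtered table of (record, word_count), dropping empty-text records.
def pvBTable (text_key : String) (records : List (List (String × String))) :
    List ((List (String × String)) × Int) :=
  records.filterMap (fun record =>
    if pvText text_key record = "" then none else some (record, pvWords text_key record))

-- Phase 2: running cumulative totals.
def pvCums : List ((List (String × String)) × Int) → Int → List Int
  | [], _ => []
  | p :: ps, t => (t + p.2) :: pvCums ps (t + p.2)

def limit_records_by_word_count_alt (records : List (List (String × String))) (text_key : String) (max_words : Int) : List (List (String × String)) :=
  let table := pvBTable text_key records
  let cums := pvCums table 0
  let k := (cums.takeWhile (fun c => decide (c ≤ max_words))).length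
  (table.take k).map Prod.fst

-- ===== PRECONDITION & SPEC =====
def Spec_limit_records_by_word_count (records : List (List (String × String))) (text_key : String) (max_words : Int) (out : List (List (String × String))) : Prop := out = limit_records_by_word_count_alt records text_key max_words
instance (records : List (List (String × String))) (text_key : String) (max_words : Int) (out : List (List (String × String))) : Decidable (Spec_limit_records_by_word_count records text_key max_words out) := by unfold Spec_limit_records_by_word_count; infer_instance

-- ===== CLAIM (what is proved, stated in full; the proofs are below) =====
def Claim_equal_limit_records_by_word_count : Prop := ∀ (records : List (List (String × String))) (text_key : String) (max_words : Int), Dom_limit_records_by_word_count records text_key max_words → Spec_limit_records_by_word_count records text_key max_words (limit_records_by_word_count records text_key max_words)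

-- ===== LEMMAS AND PROOFS =====
theorem pvBTable_cons_skip (tk : String) (r : List (String × String))
    (rest : List (List (String × String))) (h : pvText tk r = "") :
    pvBTable tk (r :: rest) = pvBTable tk rest := by
  unfold pvBTable
  rw [List.filterMap_cons, if_pos h]

theorem pvBTable_cons_keep (tk : String) (r : List (String × String))
    (rest : List (List (String × String))) (h : ¬ pvText tk r = "") :
    pvBTable tk (r :: rest) = (r, pvWords tk r) :: pvBTable tk rest := by
  unfold pvBTable
  rw [List.filterMap_cons, if_neg h]

theorem pvMain (text_key : String) (max_words : Int) :
    ∀ (records : List (List (String × String))) (total : Int),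
      pvALoop text_key max_words records total =
        ((pvBTable text_key records).take
          (((pvCums (pvBTable text_key records) total).takeWhile
            (fun c => decide (c ≤ max_words))).length)).map Prod.fst := by
  intro records
  induction records with
  | nil => intro total; rfl
  | cons record rest ih =>
    intro total
    by_cases h : pvText text_key record = ""
    · rw [pvBTable_cons_skip text_key record rest h]
      show (if pvText text_key record = "" then pvALoop text_key max_words rest total else _) = _
      rw [if_pos h]
      exact ih total
    · rw [pvBTable_cons_keep text_key record rest h]
      show (if pvText text_key record = "" then _
            else if total + pvWords text_key record > max_words then []
            else record :: pvALoop text_key max_words rest (total + pvWords text_key record)) = _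
      rw [if_neg h]
      by_cases hb : total + pvWords text_key record > max_words
      · have hfalse : decide (total + pvWords text_key record ≤ max_words) = false := by
          simp only [decide_eq_false_iff_not]; omega
        rw [if_pos hb, pvCums, List.takeWhile_cons, hfalse]
        rfl
      · have htrue : decide (total + pvWords text_key record ≤ max_words) = true := by
          simp only [decide_eq_true_eq]; omega
        rw [if_neg hb, pvCums, List.takeWhile_cons, htrue]
        simp only [if_true, List.length_cons, List.take_succ_cons, List.map_cons]
        rw [ih (total + pvWords text_key record)]

-- ===== VERDICT (by name: the statement is the Claim_ definition above) =====
theorem limit_records_by_word_count_spec : Claim_equal_limit_records_by_word_count := by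
  intro records text_key max_words _
  unfold Spec_limit_records_by_word_count limit_records_by_word_count limit_records_by_word_count_alt
  exact pvMain text_key max_words records 0
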